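-- pv_equiv track=rewrite | github.com/moya2717/Codecademy_Moya_Murder_Mystery | Codecademy_Moya_Murder_Mystery.py | ngram_creator
-- ===== SOURCE A (Python) =====
-- def ngram_creator(text_list):
--     two_n_gram = []
--     counter = 0
--     if len(text_list) % 2 != 0:
--         text_list.remove(text_list[len(text_list)-1])
--     for counter in range(0,len(text_list)):
--         counter +=1
--         if counter % 2 != 0:
--             two_n_gram.append((text_list[counter-1]+ " " + text_list[counter]))
--     return two_n_gram
-- ===== SOURCE B (Python) =====
-- def ngram_creator(text_list):
--     if len(text_list) % 2 != 0:
--         text_list.remove(text_list[-1])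
--     work = list(text_list)
--     out = []
--     while work:
--         second = work.pop()
--         first = work.pop()
--         out.append(first + " " + second)
--     out.reverse()
--     return out
-- ===== Notes on version B (the rewrite author's own statement) =====
-- stated objective: alternative
-- what changed: B replaces A's forward parity-tested index loop with a staged right-to-left construction: it copies the trimmed list, destructively pops the last two words at a time building the result back-to-front, and reverses the result at the end; the in-place remove() on odd length is kept identical.
import Mathlib
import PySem

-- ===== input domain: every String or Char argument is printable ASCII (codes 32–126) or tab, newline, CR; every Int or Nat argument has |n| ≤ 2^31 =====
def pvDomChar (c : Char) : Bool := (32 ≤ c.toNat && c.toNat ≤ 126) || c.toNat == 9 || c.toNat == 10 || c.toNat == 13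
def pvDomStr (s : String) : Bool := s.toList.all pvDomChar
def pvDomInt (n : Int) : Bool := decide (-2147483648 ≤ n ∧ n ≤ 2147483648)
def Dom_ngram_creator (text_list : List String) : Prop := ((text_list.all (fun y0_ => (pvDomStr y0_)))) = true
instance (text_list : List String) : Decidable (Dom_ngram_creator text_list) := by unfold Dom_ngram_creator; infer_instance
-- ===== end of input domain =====

-- B builds the bigrams right-to-left (popping the last two words of a working copy,
-- then reversing the collected output) instead of A's forward parity-tested index loop
-- (objective: alternative; same cost).  Both A and B mutate the caller's list in place
-- via remove() on odd length; the equivalence proved here is about the return value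
-- only (the mutation is identical in both).

-- ===== PORT A =====
-- odd length: text_list.remove(text_list[len(text_list)-1]); the match fallbacks are
-- unreachable totality guards (an odd-length list is nonempty, and the fetched element is
-- a member), as is the default "" of pyGetD (every index the loop touches is in range).
def ngram_creator (text_list : List String) : List String :=
  let tl :=
    if text_list.length % 2 ≠ 0 then
      match PySem.List.pyGet? text_list ((text_list.length : Int) - 1) with
      | some v =>
        match PySem.List.remove? text_list v with
        | some l => l
        | none => text_list
      | none => text_list
    else text_list
  (PySem.List.pyRange 0 (tl.length : Int) 1).foldl
    (fun acc c =>
      if PySem.Int.mod (c + 1) 2 ≠ 0 then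
        acc ++ [PySem.List.pyGetD tl ((c + 1) - 1) "" ++ " " ++ PySem.List.pyGetD tl (c + 1) ""]
      else acc) []

-- ===== PORT B =====
-- the while loop pops from the END of the working copy = consumes the reversed list
-- from the front, two at a time (second first, then first), appending to out;
-- out.reverse() at the end.  The even length of the trimmed list guarantees the pops
-- never hit an empty list, so the catch-all base case is an unreachable totality guard.
def pvPopPairs : List String → List String → List String
  | second :: first :: work, out => pvPopPairs work (out ++ [first ++ " " ++ second])
  | _, out => out

def ngram_creator_alt (text_list : List String) : List String :=
  let tl :=
    if text_list.length % 2 ≠ 0 then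
      match PySem.List.pyGet? text_list (-1) with
      | some v =>
        match PySem.List.remove? text_list v with
        | some l => l
        | none => text_list
      | none => text_list
    else text_list
  (pvPopPairs tl.reverse []).reverse

-- ===== PRECONDITION & SPEC =====
def Spec_ngram_creator (text_list : List String) (out : List String) : Prop := out = ngram_creator_alt text_list
instance (text_list : List String) (out : List String) : Decidable (Spec_ngram_creator text_list out) := by unfold Spec_ngram_creator; infer_instance

-- ===== CLAIM (what is proved, stated in full; the proofs are below) =====
def Claim_equal_ngram_creator : Prop := ∀ (text_list : List String), Dom_ngram_creator text_list → Spec_ngram_creator text_list (ngram_creator text_list)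

-- ===== LEMMAS AND PROOFS =====

-- proof-only intermediate: the consecutive pairs of l, front to back
def pvPairUp : List String → List String
  | a :: b :: r => (a ++ " " ++ b) :: pvPairUp r
  | _ => []

-- A's parity-tested index loop over `pre ++ r`, started at the even index `pre.length`,
-- emits exactly the consecutive pairs of r.
lemma pvLoopAux (r : List String) : ∀ (pre acc : List String), pre.length % 2 = 0 → r.length % 2 = 0 →
    (PySem.List.pyRange (pre.length : Int) (((pre ++ r).length : Nat) : Int) 1).foldl
      (fun acc c =>
        if PySem.Int.mod (c + 1) 2 ≠ 0 then
          acc ++ [PySem.List.pyGetD (pre ++ r) ((c + 1) - 1) "" ++ " " ++ PySem.List.pyGetD (pre ++ r) (c + 1) ""]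
        else acc) acc = acc ++ pvPairUp r := by
  induction r using pvPairUp.induct with
  | case1 a b r ih =>
    intro pre acc hpre hr
    have hre : pre ++ a :: b :: r = (pre ++ [a, b]) ++ r := by simp
    have hlen : (((pre ++ a :: b :: r).length : Nat) : Int) = ((((pre ++ [a, b]) ++ r).length : Nat) : Int) := by rw [hre]
    rw [PySem.List.pyRange_one_cons (by simp; omega)]
    rw [List.foldl_cons]
    have h1 : PySem.Int.mod ((pre.length : Int) + 1) 2 ≠ 0 := by
      have : ((pre.length : Int) + 1) = ((pre.length + 1 : Nat) : Int) := by push_cast; ring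
      rw [this, PySem.Int.mod_eq_emod_of_pos (by norm_num)]
      omega
    rw [if_pos h1]
    have g1 : PySem.List.pyGetD (pre ++ a :: b :: r) (((pre.length : Int) + 1) - 1) "" = a := by
      have : ((pre.length : Int) + 1) - 1 = ((pre.length : Nat) : Int) := by ring
      rw [this]
      simp [PySem.List.pyGetD_natCast]
    have g2 : PySem.List.pyGetD (pre ++ a :: b :: r) ((pre.length : Int) + 1) "" = b := by
      have h : ((pre.length : Int) + 1) = ((pre.length + 1 : Nat) : Int) := by push_cast; ring
      rw [h, PySem.List.pyGetD_natCast,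
        List.getD_append_right (l := pre) (l' := a :: b :: r) (d := "") (n := pre.length + 1) (by omega)]
      simp
    rw [g1, g2]
    rw [PySem.List.pyRange_one_cons (by simp)]
    rw [List.foldl_cons]
    have h2 : ¬ PySem.Int.mod ((pre.length : Int) + 1 + 1) 2 ≠ 0 := by
      have : ((pre.length : Int) + 1 + 1) = ((pre.length + 2 : Nat) : Int) := by omega
      rw [this, PySem.Int.mod_eq_emod_of_pos (by norm_num)]
      omega
    rw [if_neg h2]
    have hstart : (pre.length : Int) + 1 + 1 = (((pre ++ [a, b]).length : Nat) : Int) := by simp; omega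
    rw [hstart, hlen, hre]
    rw [ih (pre ++ [a, b]) (acc ++ [a ++ " " ++ b]) (by simp; omega) (by simp at hr; omega)]
    simp [pvPairUp]
  | case2 t ht =>
    intro pre acc hpre hr
    match t, ht with
    | [], _ =>
      rw [List.append_nil, PySem.List.pyRange_one_eq_nil (le_refl _)]
      simp [pvPairUp]
    | [a], _ => simp at hr
    | a :: b :: r, ht => exact absurd rfl (by intro h; exact ht a b r h)

lemma pvLoop_eq (l : List String) (h : l.length % 2 = 0) :
    (PySem.List.pyRange 0 (l.length : Int) 1).foldl
      (fun acc c =>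
        if PySem.Int.mod (c + 1) 2 ≠ 0 then
          acc ++ [PySem.List.pyGetD l ((c + 1) - 1) "" ++ " " ++ PySem.List.pyGetD l (c + 1) ""]
        else acc) [] = pvPairUp l := by
  have := pvLoopAux l [] [] (by simp) h
  simpa using this

-- popping pairs off the reversed even-length list collects the consecutive pairs of l
-- in reverse order (appended after whatever is already in out)
lemma pvPopPairsAux (l : List String) : ∀ (rest out : List String), l.length % 2 = 0 →
    pvPopPairs (l.reverse ++ rest) out = pvPopPairs rest (out ++ (pvPairUp l).reverse) := by
  induction l using pvPairUp.induct with
  | case1 a b r ih =>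
    intro rest out hl
    have hre : (a :: b :: r).reverse ++ rest = r.reverse ++ ([b, a] ++ rest) := by simp
    rw [hre, ih ([b, a] ++ rest) out (by simp at hl; omega)]
    simp [pvPopPairs, pvPairUp]
  | case2 t ht =>
    intro rest out hl
    match t, ht with
    | [], _ => simp [pvPairUp]
    | [a], _ => simp at hl
    | a :: b :: r, ht => exact absurd rfl (by intro h; exact ht a b r h)

lemma pvPop_eq (l : List String) (h : l.length % 2 = 0) :
    (pvPopPairs l.reverse []).reverse = pvPairUp l := by
  have h2 := pvPopPairsAux l [] [] h
  simp [pvPopPairs] at h2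
  simp [h2]

theorem pv_main (text_list : List String) : ngram_creator text_list = ngram_creator_alt text_list := by
  unfold ngram_creator ngram_creator_alt
  by_cases hpar : text_list.length % 2 = 0
  · simp only [hpar, ne_eq, not_true_eq_false, if_neg, not_false_eq_true]
    rw [pvLoop_eq text_list hpar, pvPop_eq text_list hpar]
  · have hne : text_list ≠ [] := by
      intro h; rw [h] at hpar; simp at hpar
    obtain ⟨v, hv⟩ := Option.isSome_iff_exists.mp (List.getLast?_isSome.mpr hne)
    have e1 : PySem.List.pyGet? text_list ((text_list.length : Int) - 1) = some v := by
      have hc : ((text_list.length : Int) - 1) = ((text_list.length - 1 : Nat) : Int) := by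
        have : 1 ≤ text_list.length := List.length_pos_iff.mpr hne
        omega
      rw [hc, PySem.List.pyGet?_natCast, ← List.getLast?_eq_getElem?]
      exact hv
    have e2 : PySem.List.pyGet? text_list (-1 : Int) = some v := by
      rw [PySem.List.pyGet?_neg_one]; exact hv
    have hvmem : v ∈ text_list := List.mem_of_getLast? hv
    have hl : PySem.List.remove? text_list v = some (text_list.erase v) :=
      PySem.List.remove?_eq_some_erase text_list v hvmem
    have hllen : (text_list.erase v).length % 2 = 0 := by
      have := List.length_erase_of_mem hvmem
      omega
    simp only [e1, e2, hl, ne_eq, hpar, not_false_eq_true, if_true]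
    rw [pvLoop_eq _ hllen, pvPop_eq _ hllen]

-- ===== VERDICT (by name: the statement is the Claim_ definition above) =====
theorem ngram_creator_spec : Claim_equal_ngram_creator := by
  intro tl _
  unfold Spec_ngram_creator
  exact pv_main tl
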